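-- pv_equiv track=rewrite | github.com/Vit-sa07/lab | second.py | generate_lfsr_table_4bit
-- ===== SOURCE A (Python) =====
-- def generate_lfsr_table_4bit(poly, initial_state, steps):
--     taps = [len(poly) - i - 1 for i, x in enumerate(poly) if x == 1][1:]
--     state = initial_state.copy()
--     lfsr_table = []
--     for step in range(steps):
--         next_bit = sum(state[i] for i in taps) % 2
--         state = state[:-1]
--         state.insert(0, next_bit)
--         lfsr_table.append((''.join(str(bit) for bit in state[::-1]), state[-1]))
--     return lfsr_table
-- ===== SOURCE B (Python) =====
-- def generate_lfsr_table_4bit(poly, initial_state, steps):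
--     # Sliding-window re-implementation: build the whole bit stream once
--     # (reversed initial state followed by the generated feedback bits), then
--     # read each table row as a fixed-width window of the stream.
--     n = len(initial_state)
--     taps = [len(poly) - i - 1 for i, x in enumerate(poly) if x == 1][1:]
--     s = initial_state[::-1]
--     for _ in range(steps):
--         s.append(sum(s[-1 - i] for i in taps) % 2)
--     return [(''.join(map(str, s[k:k + n])), s[k]) for k in range(1, steps + 1)]
-- ===== Notes on version B (the rewrite author's own statement) =====
-- stated objective: alternative
-- what changed: Instead of shifting a state list every step, B builds the entire bit stream once (reversed initial state followed by the generated feedback bits) and reads each table row as a fixed-width sliding window of that stream.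
-- outside the precondition, e.g. on generate_lfsr_table_4bit([1], [], 2): A returns [('0', 0), ('0', 0)], B raises IndexError
import Mathlib
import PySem

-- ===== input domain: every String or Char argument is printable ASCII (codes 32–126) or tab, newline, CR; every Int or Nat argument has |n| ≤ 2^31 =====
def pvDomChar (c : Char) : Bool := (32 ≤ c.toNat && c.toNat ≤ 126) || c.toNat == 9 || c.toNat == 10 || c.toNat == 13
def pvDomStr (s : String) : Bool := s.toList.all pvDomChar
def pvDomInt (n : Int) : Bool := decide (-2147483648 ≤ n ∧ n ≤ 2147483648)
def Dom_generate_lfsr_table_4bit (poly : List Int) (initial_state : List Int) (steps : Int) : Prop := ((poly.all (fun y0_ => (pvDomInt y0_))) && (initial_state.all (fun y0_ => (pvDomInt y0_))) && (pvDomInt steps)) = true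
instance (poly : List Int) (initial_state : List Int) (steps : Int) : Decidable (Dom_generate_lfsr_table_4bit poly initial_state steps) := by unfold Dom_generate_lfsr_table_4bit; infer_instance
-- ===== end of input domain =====

-- B replaces A's per-step list shifting by building the whole bit stream once and reading each
-- table row as a fixed-width sliding window of it (objective: alternative; return value only).

-- ===== PORT A =====
-- taps = [len(poly) - i - 1 for i, x in enumerate(poly) if x == 1][1:]   (shared helper: B computes taps with the same expression)
def pvTaps (poly : List Int) : List Int :=
  PySem.List.slice
    (((PySem.List.enumerate poly 0).filter (fun p => p.2 == 1)).map
      (fun p => (poly.length : Int) - p.1 - 1))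
    (some 1) none

-- next_bit = sum(state[i] for i in taps) % 2 ; state[i] raises IndexError when out of range —
-- Pre_ keeps every tap in range, so the default 0 is never read under Pre_
def pvNextA (taps state : List Int) : Int :=
  PySem.Int.mod (taps.foldl (fun s i => s + PySem.List.pyGetD state i 0) 0) 2

-- state = state[:-1]; state.insert(0, next_bit)
def pvStepA (taps state : List Int) : List Int :=
  PySem.List.insert (PySem.List.slice state none (some (-1))) 0 (pvNextA taps state)

-- (''.join(str(bit) for bit in state[::-1]), state[-1]) ; state[::-1] is reverse (PySem.List.slice?_none_none_neg_one)
def pvRowA (state : List Int) : String × Int :=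
  (PySem.Str.join "" ((state.reverse).map PySem.Int.toStr), PySem.List.pyGetD state (-1) 0)

def generate_lfsr_table_4bit (poly : List Int) (initial_state : List Int) (steps : Int) : List (String × Int) :=
  ((PySem.List.pyRange 0 steps 1).foldl
    (fun (acc : List Int × List (String × Int)) _ =>
      (pvStepA (pvTaps poly) acc.1, acc.2 ++ [pvRowA (pvStepA (pvTaps poly) acc.1)]))
    (initial_state, [])).2

-- ===== PORT B =====
-- s.append(sum(s[-1 - i] for i in taps) % 2)
def pvNextB (taps s : List Int) : Int :=
  PySem.Int.mod (taps.foldl (fun a i => a + PySem.List.pyGetD s (-1 - i) 0) 0) 2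

-- (''.join(map(str, s[k:k + n])), s[k])
def pvRowB (n : Int) (s : List Int) (k : Int) : String × Int :=
  (PySem.Str.join "" ((PySem.List.slice s (some k) (some (k + n))).map PySem.Int.toStr),
   PySem.List.pyGetD s k 0)

def generate_lfsr_table_4bit_alt (poly : List Int) (initial_state : List Int) (steps : Int) : List (String × Int) :=
  -- s = initial_state[::-1]; one appended feedback bit per step; then the window comprehension
  (PySem.List.pyRange 1 (steps + 1) 1).map
    (pvRowB (initial_state.length : Int)
      ((PySem.List.pyRange 0 steps 1).foldl
        (fun s _ => s ++ [pvNextB (pvTaps poly) s]) initial_state.reverse))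

-- ===== PRECONDITION & SPEC =====
-- Pre_ excludes (for steps > 0) inputs where some tap index is ≥ len(initial_state) — there A raises
-- IndexError — and the degenerate empty initial_state, where A's state grows from length 0 to 1 while B's
-- fixed-width sliding window raises IndexError.
def Pre_generate_lfsr_table_4bit (poly : List Int) (initial_state : List Int) (steps : Int) : Prop :=
  steps ≤ 0 ∨ (initial_state ≠ [] ∧ ∀ t ∈ pvTaps poly, t < (initial_state.length : Int))
instance (poly : List Int) (initial_state : List Int) (steps : Int) : Decidable (Pre_generate_lfsr_table_4bit poly initial_state steps) := by unfold Pre_generate_lfsr_table_4bit; infer_instance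

def pvWitness_generate_lfsr_table_4bit : List Int × List Int × Int := ([1, 0, 0, 1], [1, 0, 1, 1], 3)

def Spec_generate_lfsr_table_4bit (poly : List Int) (initial_state : List Int) (steps : Int) (out : List (String × Int)) : Prop := out = generate_lfsr_table_4bit_alt poly initial_state steps
instance (poly : List Int) (initial_state : List Int) (steps : Int) (out : List (String × Int)) : Decidable (Spec_generate_lfsr_table_4bit poly initial_state steps out) := by unfold Spec_generate_lfsr_table_4bit; infer_instance

-- ===== CLAIM (what is proved, stated in full; the proofs are below) =====
def Claim_equal_generate_lfsr_table_4bit : Prop := ∀ (poly : List Int) (initial_state : List Int) (steps : Int), Dom_generate_lfsr_table_4bit poly initial_state steps → Pre_generate_lfsr_table_4bit poly initial_state steps → Spec_generate_lfsr_table_4bit poly initial_state steps (generate_lfsr_table_4bit poly initial_state steps)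

-- ===== LEMMAS AND PROOFS =====

-- B's stream after k steps, A's state and table after k steps, as plain Nat recursions
def pvSB (taps init : List Int) : Nat → List Int
  | 0 => init.reverse
  | k + 1 => pvSB taps init k ++ [pvNextB taps (pvSB taps init k)]

def pvStA (taps init : List Int) : Nat → List Int
  | 0 => init
  | k + 1 => pvStepA taps (pvStA taps init k)

def pvTbA (taps init : List Int) : Nat → List (String × Int)
  | 0 => []
  | k + 1 => pvTbA taps init k ++ [pvRowA (pvStA taps init (k + 1))]

lemma pv_foldl_ignore_iterate {α β : Type} (f : α → α) (l : List β) (a : α) :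
    l.foldl (fun x _ => f x) a = f^[l.length] a := by
  induction l generalizing a with
  | nil => rfl
  | cons x l ih => simp [List.foldl_cons, ih, Function.iterate_succ_apply]

lemma pv_len_sB (taps init : List Int) (k : Nat) :
    (pvSB taps init k).length = init.length + k := by
  induction k with
  | zero => simp [pvSB]
  | succ k ih => simp [pvSB, ih]; omega

lemma pv_sB_prefix (taps init : List Int) {k K : Nat} (h : k ≤ K) :
    pvSB taps init k <+: pvSB taps init K := by
  induction K with
  | zero => simp_all
  | succ K ih =>
    rcases Nat.lt_or_ge k (K + 1) with h' | h'
    · exact (ih (by omega)).trans ⟨_, rfl⟩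
    · have hk : k = K + 1 := by omega
      subst hk; exact List.prefix_rfl

lemma pv_taps_nonneg (poly : List Int) : ∀ t ∈ pvTaps poly, 0 ≤ t := by
  intro t ht
  have ht' := PySem.List.mem_of_mem_slice _ _ _ ht
  simp only [List.mem_map, List.mem_filter] at ht'
  obtain ⟨p, ⟨hp, _⟩, rfl⟩ := ht'
  have h1 : p.1 ∈ (PySem.List.enumerate poly 0).map (·.1) := List.mem_map_of_mem hp
  rw [PySem.List.map_fst_enumerate, PySem.List.mem_pyRange_one] at h1
  omega

lemma pv_getD_rev_drop (s : List Int) (k i n : Nat) (hlen : s.length = n + k) (hi : i < n) :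
    ((s.drop k).reverse).getD i 0 = s.getD (n + k - 1 - i) 0 := by
  rw [List.getD_eq_getElem?_getD, List.getD_eq_getElem?_getD]
  rw [List.getElem?_reverse (by simp [hlen]; omega), List.getElem?_drop]
  congr 2
  simp [hlen]; omega

lemma pv_getD_prefix (l t : List Int) (i : Nat) (hi : i < l.length) :
    (l ++ t).getD i 0 = l.getD i 0 := by
  rw [List.getD_eq_getElem?_getD, List.getD_eq_getElem?_getD, List.getElem?_append_left hi]

-- A's feedback bit read on the shifted state equals B's read on the stream tail
lemma pv_read (taps init : List Int) (k : Nat)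
    (ht : ∀ t ∈ taps, 0 ≤ t ∧ t < (init.length : Int))
    (hst : pvStA taps init k = ((pvSB taps init k).drop k).reverse) :
    pvNextA taps (pvStA taps init k) = pvNextB taps (pvSB taps init k) := by
  have hL := pv_len_sB taps init k
  unfold pvNextA pvNextB
  congr 1
  apply PySem.List.foldl_congr_mem
  intro a t htm
  obtain ⟨h0, hlt⟩ := ht t htm
  have htn : t = ((t.toNat : Nat) : Int) := (Int.toNat_of_nonneg h0).symm
  congr 1
  rw [htn, PySem.List.pyGetD_natCast]
  have hneg : -1 - ((t.toNat : Nat) : Int) = -(((t.toNat + 1 : Nat) : Int)) := by push_cast; omega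
  rw [hneg, PySem.List.pyGetD_neg_natCast _ _ _ (by omega) (by omega)]
  rw [← List.getD_eq_getElem _ 0 (by omega)]
  rw [hst, pv_getD_rev_drop _ k _ init.length hL (by omega)]
  congr 1
  omega

-- the invariant: A's state after k steps is the reverse of the length-n suffix of B's stream
lemma pv_inv (taps init : List Int) (hn : init ≠ [])
    (ht : ∀ t ∈ taps, 0 ≤ t ∧ t < (init.length : Int)) (k : Nat) :
    pvStA taps init k = ((pvSB taps init k).drop k).reverse := by
  induction k with
  | zero => simp [pvStA, pvSB]
  | succ k ih =>
    have hL := pv_len_sB taps init k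
    have hn' : 0 < init.length := List.length_pos_iff.mpr hn
    have hr := pv_read taps init k ht ih
    show pvStepA taps (pvStA taps init k) = _
    unfold pvStepA
    rw [PySem.List.slice_to_neg_one, PySem.List.insert_zero, hr, ih]
    rw [List.dropLast_reverse, List.tail_drop]
    show _ = ((pvSB taps init k ++ [pvNextB taps (pvSB taps init k)]).drop (k + 1)).reverse
    rw [List.drop_append_of_le_length (by omega)]
    simp

lemma pv_row (taps init : List Int) (hn : init ≠ [])
    (ht : ∀ t ∈ taps, 0 ≤ t ∧ t < (init.length : Int)) (k m : Nat) (hk : k < m) :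
    pvRowA (pvStA taps init (k + 1)) =
      pvRowB (init.length : Int) (pvSB taps init m) ((k : Int) + 1) := by
  have hn' : 0 < init.length := List.length_pos_iff.mpr hn
  have hinv := pv_inv taps init hn ht (k + 1)
  have hLk := pv_len_sB taps init (k + 1)
  obtain ⟨r, hr⟩ := pv_sB_prefix taps init (show k + 1 ≤ m by omega)
  have hcast : ((k : Int) + 1) = (((k + 1 : Nat) : Int)) := by push_cast; ring
  have hseg : (pvStA taps init (k + 1)).reverse = (pvSB taps init (k + 1)).drop (k + 1) := by
    rw [hinv, List.reverse_reverse]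
  unfold pvRowA pvRowB
  rw [← hr]
  simp only [Prod.mk.injEq]
  constructor
  · congr 1
    rw [hseg, hcast, PySem.List.slice_natCast_add]
    rw [List.drop_append_of_le_length (by omega)]
    rw [List.take_left' (by simp [hLk])]
  · have hm1 : (-1 : Int) = -(((1 : Nat) : Int)) := by norm_num
    have hlenSt : (pvStA taps init (k + 1)).length = init.length := by
      rw [hinv]; simp [hLk]
    rw [hm1, PySem.List.pyGetD_neg_natCast _ _ _ (by omega) (by omega)]
    rw [← List.getD_eq_getElem _ 0 (by omega)]
    rw [hinv]
    have hlen' : ((pvSB taps init (k + 1)).drop (k + 1)).reverse.length = init.length := by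
      simp [hLk]
    rw [hlen', pv_getD_rev_drop _ (k + 1) _ init.length hLk (by omega)]
    rw [hcast, PySem.List.pyGetD_natCast]
    rw [pv_getD_prefix _ _ _ (by omega)]
    congr 1
    omega

lemma pv_tb (taps init : List Int) (hn : init ≠ [])
    (ht : ∀ t ∈ taps, 0 ≤ t ∧ t < (init.length : Int)) (m : Nat) :
    ∀ j, j ≤ m →
      pvTbA taps init j =
        (PySem.List.pyRange 1 ((j : Int) + 1) 1).map
          (pvRowB (init.length : Int) (pvSB taps init m)) := by
  intro j
  induction j with
  | zero => intro _; simp [pvTbA]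
  | succ j ih =>
    intro hj
    have hcast : ((j + 1 : Nat) : Int) + 1 = ((j : Int) + 1) + 1 := by push_cast; ring
    show pvTbA taps init j ++ [pvRowA (pvStA taps init (j + 1))] = _
    rw [hcast, PySem.List.pyRange_one_succ_right (show (1 : Int) ≤ (j : Int) + 1 by omega)]
    rw [List.map_append]
    congr 1
    · exact ih (by omega)
    · simp [pv_row taps init hn ht j m (by omega)]

lemma pv_foldB (taps init : List Int) (l : List Int) :
    l.foldl (fun s _ => s ++ [pvNextB taps s]) init.reverse = pvSB taps init l.length := by
  rw [pv_foldl_ignore_iterate (fun s => s ++ [pvNextB taps s]) l init.reverse]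
  induction l.length with
  | zero => rfl
  | succ k ih => rw [Function.iterate_succ_apply', ih]; rfl

lemma pv_foldA (taps init : List Int) (l : List Int) :
    (l.foldl
      (fun (acc : List Int × List (String × Int)) _ =>
        (pvStepA taps acc.1, acc.2 ++ [pvRowA (pvStepA taps acc.1)]))
      (init, [])) = (pvStA taps init l.length, pvTbA taps init l.length) := by
  rw [pv_foldl_ignore_iterate
    (fun (acc : List Int × List (String × Int)) =>
      (pvStepA taps acc.1, acc.2 ++ [pvRowA (pvStepA taps acc.1)])) l (init, [])]
  induction l.length with
  | zero => rfl
  | succ k ih => rw [Function.iterate_succ_apply', ih]; simp [pvStA, pvTbA]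

-- ===== VERDICT (by name: the statement is the Claim_ definition above) =====
theorem generate_lfsr_table_4bit_spec : Claim_equal_generate_lfsr_table_4bit := by
  intro poly init steps _ hPre
  unfold Spec_generate_lfsr_table_4bit generate_lfsr_table_4bit generate_lfsr_table_4bit_alt
  by_cases hs : steps ≤ 0
  · rw [PySem.List.pyRange_one_eq_nil hs,
      PySem.List.pyRange_one_eq_nil (show steps + 1 ≤ 1 by omega)]
    simp
  · rcases hPre with hs' | ⟨hn, ht'⟩
    · omega
    have ht : ∀ t ∈ pvTaps poly, 0 ≤ t ∧ t < (init.length : Int) :=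
      fun t h => ⟨pv_taps_nonneg poly t h, ht' t h⟩
    have hlenA : (PySem.List.pyRange 0 steps 1).length = steps.toNat := by
      rw [PySem.List.length_pyRange_one]; omega
    have hsteps : steps = ((steps.toNat : Nat) : Int) := by omega
    rw [pv_foldA (pvTaps poly) init, pv_foldB (pvTaps poly) init, hlenA]
    conv_rhs => rw [hsteps]
    exact pv_tb (pvTaps poly) init hn ht steps.toNat steps.toNat le_rfl
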